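-- pv_equiv track=rewrite | github.com/kapilgolimar/Factors_affecting_tourism | Factors/Facility/word_break.py | word_break
-- ===== SOURCE A (Python) =====
-- def word_break(sentence):
--     listof = [".",",","!","?"," "]
--     one = 0
--     words = []
--     index_initial = 0
--     index_final = 0
--     while index_final < len(sentence):
--         letter = sentence[index_final]
--         index_final += 1
--         for index,item in enumerate(listof):
--             if item == letter:
--                 word = sentence[index_initial:index_final-1]
--                 index_initial = index_final
--                 if word != " ":
--                     words.append(word)
--
--     return words
-- ===== SOURCE B (Python) =====
-- def word_break(sentence):
--     words = []
--     buf = []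
--     for ch in sentence:
--         if ch in '.,!? ':
--             words.append(''.join(buf))
--             buf = []
--         else:
--             buf.append(ch)
--     return words
-- ===== Notes on version B (the rewrite author's own statement) =====
-- stated objective: simpler
-- what changed: Replaces A's index bookkeeping (two indices, string slicing, inner scan over the 5-element delimiter list, dead guard) by a single streaming pass that accumulates characters into a buffer and flushes it on each delimiter; the buffer is never flushed at the end, matching A's trailing-segment drop.
import Mathlib
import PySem

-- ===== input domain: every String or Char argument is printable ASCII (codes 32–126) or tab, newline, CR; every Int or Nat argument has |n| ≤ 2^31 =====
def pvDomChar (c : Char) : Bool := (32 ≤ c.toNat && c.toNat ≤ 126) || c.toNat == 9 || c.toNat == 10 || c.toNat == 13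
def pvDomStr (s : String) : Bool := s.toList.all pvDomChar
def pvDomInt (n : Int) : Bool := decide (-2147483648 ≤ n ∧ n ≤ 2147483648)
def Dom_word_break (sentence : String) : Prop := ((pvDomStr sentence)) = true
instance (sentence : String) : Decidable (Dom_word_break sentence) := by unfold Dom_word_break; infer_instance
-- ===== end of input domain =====

-- B replaces A's two-index slicing scheme by a single streaming pass with a character
-- buffer flushed at each delimiter (simpler decomposition; same return value).

-- ===== PORT A =====
def wbListof : List Char := ['.', ',', '!', '?', ' ']

-- the inner `for index,item in enumerate(listof): if item == letter: ...` loop;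
-- state is (index_initial, words); finish is index_final AFTER the += 1
def wbInner (cs : List Char) (letter : Char) (finish : Nat) (st : Nat × List String) : Nat × List String :=
  (PySem.List.enumerate wbListof 0).foldl
    (fun st p =>
      if p.2 == letter then
        let word := String.ofList (PySem.List.slice cs (some (st.1 : Int)) (some ((finish : Int) - 1)))
        (finish, if word ≠ " " then st.2 ++ [word] else st.2)
      else st) st

def wbLoop (cs : List Char) (ii fin : Nat) (words : List String) : List String :=
  if h : fin < cs.length then
    wbLoop cs (wbInner cs cs[fin] (fin + 1) (ii, words)).1 (fin + 1)
      (wbInner cs cs[fin] (fin + 1) (ii, words)).2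
  else words
termination_by cs.length - fin

def word_break (sentence : String) : List String :=
  wbLoop sentence.toList 0 0 []

-- ===== PORT B =====
def wbDelims : List Char := ['.', ',', '!', '?', ' ']

def word_break_alt (sentence : String) : List String :=
  (sentence.toList.foldl
    (fun (st : List Char × List String) ch =>
      if ch ∈ wbDelims then ([], st.2 ++ [String.ofList st.1])
      else (st.1 ++ [ch], st.2))
    ([], [])).2

-- ===== PRECONDITION & SPEC =====
def Spec_word_break (sentence : String) (out : List String) : Prop := out = word_break_alt sentence
instance (sentence : String) (out : List String) : Decidable (Spec_word_break sentence out) := by unfold Spec_word_break; infer_instance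

-- ===== CLAIM (what is proved, stated in full; the proofs are below) =====
def Claim_equal_word_break : Prop := ∀ (sentence : String), Dom_word_break sentence → Spec_word_break sentence (word_break sentence)

-- ===== LEMMAS AND PROOFS =====

-- common reference: the words produced from the remaining characters with current buffer
def wbRefB : List Char → List Char → List String
  | [], _ => []
  | c :: cs, buf => if c ∈ wbDelims then String.ofList buf :: wbRefB cs [] else wbRefB cs (buf ++ [c])

theorem wbFoldB (cs : List Char) (buf : List Char) (ws : List String) :
    (cs.foldl
      (fun (st : List Char × List String) ch =>
        if ch ∈ wbDelims then ([], st.2 ++ [String.ofList st.1])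
        else (st.1 ++ [ch], st.2))
      (buf, ws)).2 = ws ++ wbRefB cs buf := by
  induction cs generalizing buf ws with
  | nil => simp [wbRefB]
  | cons c cs ih =>
    by_cases h : c ∈ wbDelims <;> simp [wbRefB, h, ih]

theorem wbInner_not_mem (cs : List Char) (letter : Char) (finish : Nat)
    (st : Nat × List String) (h : letter ∉ wbListof) :
    wbInner cs letter finish st = st := by
  simp only [wbListof, List.mem_cons, List.not_mem_nil, or_false, not_or] at h
  obtain ⟨h1, h2, h3, h4, h5⟩ := h
  simp [wbInner, wbListof, PySem.List.enumerate, Ne.symm h1, Ne.symm h2, Ne.symm h3,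
    Ne.symm h4, Ne.symm h5]

theorem wbInner_mem (cs : List Char) (letter : Char) (fin : Nat)
    (ii : Nat) (ws : List String) (h : letter ∈ wbListof) :
    wbInner cs letter (fin + 1) (ii, ws) =
      (fin + 1,
        if String.ofList (PySem.List.slice cs (some (ii : Int)) (some (fin : Int))) ≠ " "
        then ws ++ [String.ofList (PySem.List.slice cs (some (ii : Int)) (some (fin : Int)))]
        else ws) := by
  simp only [wbListof, List.mem_cons, List.not_mem_nil, or_false] at h
  rcases h with h | h | h | h | h <;> subst h <;>
    simp [wbInner, wbListof, PySem.List.enumerate]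

theorem wbWordNeSpace (cs : List Char) (ii fin : Nat) (hif : ii ≤ fin)
    (hinv : ∀ j, ii ≤ j → j < fin → cs.getD j ' ' ∉ wbDelims) :
    String.ofList (PySem.List.slice cs (some (ii : Int)) (some (fin : Int))) ≠ " " := by
  intro hs
  have hl : PySem.List.slice cs (some (ii : Int)) (some (fin : Int)) = [' '] := by
    have h2 := congrArg String.toList hs
    simpa using h2
  rw [PySem.List.slice_natCast] at hl
  have hiifin : ii < fin := by
    by_contra hq
    have h0 : fin - ii = 0 := by omega
    rw [h0] at hl
    simp at hl
  have hlen : ii < cs.length := by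
    by_contra hq
    rw [List.drop_eq_nil_of_le (by omega)] at hl
    simp at hl
  have h0 : ((cs.drop ii).take (fin - ii))[0]? = some ' ' := by rw [hl]; rfl
  rw [List.getElem?_take] at h0
  rw [if_pos (by omega)] at h0
  rw [List.getElem?_drop] at h0
  rw [List.getElem?_eq_getElem (by omega)] at h0
  have hget : cs[ii + 0] = ' ' := Option.some.inj h0
  apply hinv ii le_rfl hiifin
  have hgd : cs.getD ii ' ' = ' ' := by
    rw [List.getD_eq_getElem _ _ hlen]
    simpa using hget
  rw [hgd]
  simp [wbDelims]

theorem wbLoop_eq (cs : List Char) :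
    ∀ n fin ii words, cs.length - fin = n → ii ≤ fin →
      (∀ j, ii ≤ j → j < fin → cs.getD j ' ' ∉ wbDelims) →
      wbLoop cs ii fin words = words ++ wbRefB (cs.drop fin) ((cs.drop ii).take (fin - ii)) := by
  intro n
  induction n with
  | zero =>
    intro fin ii words hn hif hinv
    have hfin : cs.length ≤ fin := by omega
    rw [wbLoop]
    simp [List.drop_eq_nil_of_le hfin, wbRefB, Nat.not_lt.mpr hfin]
  | succ n ih =>
    intro fin ii words hn hif hinv
    have hfin : fin < cs.length := by omega
    rw [wbLoop, dif_pos hfin]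
    rw [List.drop_eq_getElem_cons hfin]
    by_cases hmem : cs[fin] ∈ wbListof
    · rw [wbInner_mem cs cs[fin] fin ii words hmem]
      have hword := wbWordNeSpace cs ii fin hif hinv
      simp only [if_pos hword]
      have hmem' : cs[fin] ∈ wbDelims := hmem
      simp only [wbRefB, if_pos hmem']
      rw [ih (fin + 1) (fin + 1) (words ++ [_]) (by omega) le_rfl (by intro j h1 h2; omega)]
      have hslice : PySem.List.slice cs (some (ii : Int)) (some (fin : Int))
          = (cs.drop ii).take (fin - ii) := by
        rw [PySem.List.slice_natCast]
      simp [hslice]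
    · rw [wbInner_not_mem cs cs[fin] (fin + 1) (ii, words) hmem]
      have hmem' : cs[fin] ∉ wbDelims := hmem
      simp only [wbRefB, if_neg hmem']
      rw [ih (fin + 1) ii words (by omega) (by omega)
        (by
          intro j h1 h2
          by_cases hj : j < fin
          · exact hinv j h1 hj
          · have : j = fin := by omega
            subst this
            rw [List.getD_eq_getElem _ _ hfin]
            exact hmem')]
      have hbuf : (cs.drop ii).take (fin + 1 - ii) = (cs.drop ii).take (fin - ii) ++ [cs[fin]] := by
        have hstep : fin + 1 - ii = (fin - ii) + 1 := by omega
        rw [hstep, List.take_add_one, List.getElem?_drop]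
        have : ii + (fin - ii) = fin := by omega
        rw [this, List.getElem?_eq_getElem hfin]
        rfl
      rw [hbuf]

-- ===== VERDICT (by name: the statement is the Claim_ definition above) =====
theorem word_break_spec : Claim_equal_word_break := by
  intro sentence _
  unfold Spec_word_break word_break word_break_alt
  rw [wbFoldB]
  have := wbLoop_eq sentence.toList (sentence.toList.length) 0 0 [] (by omega) (by omega)
    (by intro j h1 h2; omega)
  simpa using this
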